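-- pv_equiv track=rewrite | github.com/CodePhobiia/Hephaestus | src/hephaestus/pantheon/coordinator.py | _strongest_severity
-- ===== SOURCE A (Python) =====
-- from collections.abc import Sequence
-- from typing import Any
--
-- _SEVERITY_ORDER = {"ADVISORY": 0, "REPAIRABLE": 1, "FATAL": 2}
--
-- def _severity(severity: Any, default: str = "REPAIRABLE") -> str:
--     value = str(severity or default).upper()
--     return value if value in _SEVERITY_ORDER else default
--
-- def _strongest_severity(severities: Sequence[str]) -> str | None:
--     strongest: str | None = None
--     strongest_rank = -1
--     for severity in severities:
--         rank = _SEVERITY_ORDER.get(_severity(severity), -1)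
--         if rank > strongest_rank:
--             strongest = _severity(severity)
--             strongest_rank = rank
--     return strongest
-- ===== SOURCE B (Python) =====
-- _SEVERITY_ORDER = {"ADVISORY": 0, "REPAIRABLE": 1, "FATAL": 2}
--
-- def _severity(severity, default="REPAIRABLE"):
--     value = str(severity or default).upper()
--     return value if value in _SEVERITY_ORDER else default
--
-- def _strongest_severity(severities):
--     present = {_severity(s) for s in severities}
--     for level in ("FATAL", "REPAIRABLE", "ADVISORY"):
--         if level in present:
--             return level
--     return None
-- ===== Notes on version B (the rewrite author's own statement) =====
-- stated objective: simpler
-- what changed: Instead of tracking a running maximum rank while scanning, B builds the set of normalized severities in one pass and then returns the first of the three fixed levels (FATAL, REPAIRABLE, ADVISORY) present in that set, or None.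
import Mathlib
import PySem

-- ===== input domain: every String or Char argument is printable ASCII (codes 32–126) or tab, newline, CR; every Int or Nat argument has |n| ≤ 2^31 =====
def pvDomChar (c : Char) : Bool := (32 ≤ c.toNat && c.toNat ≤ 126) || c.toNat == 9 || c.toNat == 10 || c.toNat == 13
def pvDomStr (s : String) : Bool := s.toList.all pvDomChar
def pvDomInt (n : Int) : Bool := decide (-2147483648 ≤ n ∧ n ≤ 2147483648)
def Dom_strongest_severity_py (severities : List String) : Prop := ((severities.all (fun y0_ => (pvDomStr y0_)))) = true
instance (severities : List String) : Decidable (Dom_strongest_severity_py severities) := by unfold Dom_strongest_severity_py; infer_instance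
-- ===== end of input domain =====

-- B replaces A's running-maximum scan by building the set of normalized severities and
-- probing the three fixed levels in descending order (objective: simpler; same cost).

-- ===== PORT A =====
-- _SEVERITY_ORDER = {"ADVISORY": 0, "REPAIRABLE": 1, "FATAL": 2}
def sevOrder : PySem.Dict String Int :=
  PySem.Dict.ofList [("ADVISORY", 0), ("REPAIRABLE", 1), ("FATAL", 2)]

-- _severity(severity) with the default "REPAIRABLE"; on a string, `severity or default`
-- is the default exactly when the string is empty, and str() is the identity.
def pySeverity (severity : String) : String :=
  let value := PySem.Str.upper (if severity == "" then "REPAIRABLE" else severity)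
  if PySem.Dict.contains sevOrder value then value else "REPAIRABLE"

def strongest_severity_py (severities : List String) : Option String :=
  (severities.foldl
    (fun st severity =>
      let rank := PySem.Dict.getD sevOrder (pySeverity severity) (-1)
      if rank > st.2 then (some (pySeverity severity), rank) else st)
    ((none : Option String), (-1 : Int))).1

-- ===== PORT B =====
def strongest_severity_py_alt (severities : List String) : Option String :=
  let present : PySem.Set String := PySem.Set.ofList (severities.map pySeverity)
  (["FATAL", "REPAIRABLE", "ADVISORY"]).find? (fun level => PySem.Set.contains present level)

-- ===== PRECONDITION & SPEC =====
def Spec_strongest_severity_py (severities : List String) (out : Option String) : Prop := out = strongest_severity_py_alt severities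
instance (severities : List String) (out : Option String) : Decidable (Spec_strongest_severity_py severities out) := by unfold Spec_strongest_severity_py; infer_instance

-- ===== CLAIM (what is proved, stated in full; the proofs are below) =====
def Claim_equal_strongest_severity_py : Prop := ∀ (severities : List String), Dom_strongest_severity_py severities → Spec_strongest_severity_py severities (strongest_severity_py severities)

-- ===== LEMMAS AND PROOFS =====

def rkOf (s : String) : Int := PySem.Dict.getD sevOrder (pySeverity s) (-1)

def nameOf (r : Int) : Option String :=
  if r = 2 then some "FATAL" else if r = 1 then some "REPAIRABLE"
  else if r = 0 then some "ADVISORY" else none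

lemma sevOrder_mk : sevOrder = PySem.Dict.mk [("ADVISORY", 0), ("REPAIRABLE", 1), ("FATAL", 2)] :=
  rfl

lemma sev_cases (s : String) :
    pySeverity s = "ADVISORY" ∨ pySeverity s = "REPAIRABLE" ∨ pySeverity s = "FATAL" := by
  unfold pySeverity
  set v := PySem.Str.upper (if s == "" then "REPAIRABLE" else s) with hv
  by_cases h : PySem.Dict.contains sevOrder v = true
  · simp only [h, if_true]
    rw [sevOrder_mk, PySem.Dict.contains_mk] at h
    simp only [List.any_cons, List.any_nil, Bool.or_eq_true, beq_iff_eq] at h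
    rcases h with h | h | h | h
    · exact Or.inl h.symm
    · exact Or.inr (Or.inl h.symm)
    · exact Or.inr (Or.inr h.symm)
    · cases h
  · simp [h]

lemma rk_name (s : String) : nameOf (rkOf s) = some (pySeverity s) := by
  rcases sev_cases s with h | h | h <;> simp [rkOf, nameOf, h] <;> decide

lemma rk_cases (s : String) : rkOf s = 0 ∨ rkOf s = 1 ∨ rkOf s = 2 := by
  rcases sev_cases s with h | h | h <;> simp [rkOf, h] <;> decide

lemma foldA (l : List String) : ∀ (r : Int),
    l.foldl
      (fun st severity =>
        let rank := PySem.Dict.getD sevOrder (pySeverity severity) (-1)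
        if rank > st.2 then (some (pySeverity severity), rank) else st)
      (nameOf r, r)
    = (nameOf (l.foldl (fun m s => max m (rkOf s)) r),
       l.foldl (fun m s => max m (rkOf s)) r) := by
  induction l with
  | nil => intro r; rfl
  | cons x t ih =>
    intro r
    simp only [List.foldl_cons]
    by_cases h : rkOf x > r
    · have hif : (if PySem.Dict.getD sevOrder (pySeverity x) (-1) > ((nameOf r, r) : Option String × Int).2
          then (some (pySeverity x), PySem.Dict.getD sevOrder (pySeverity x) (-1))
          else (nameOf r, r)) = (nameOf (rkOf x), rkOf x) := by
        rw [if_pos (show PySem.Dict.getD sevOrder (pySeverity x) (-1) > ((nameOf r, r) : Option String × Int).2 from h),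
            rk_name x]
        rfl
      rw [hif, ih (rkOf x), max_eq_right (le_of_lt h)]
    · have hif : (if PySem.Dict.getD sevOrder (pySeverity x) (-1) > ((nameOf r, r) : Option String × Int).2
          then (some (pySeverity x), PySem.Dict.getD sevOrder (pySeverity x) (-1))
          else (nameOf r, r)) = (nameOf r, r) := by
        rw [if_neg (show ¬ PySem.Dict.getD sevOrder (pySeverity x) (-1) > ((nameOf r, r) : Option String × Int).2 from h)]
      rw [hif, ih r, max_eq_left (by omega : rkOf x ≤ r)]

lemma le_foldM (l : List String) : ∀ r : Int, r ≤ l.foldl (fun m s => max m (rkOf s)) r := by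
  induction l with
  | nil => intro r; simp
  | cons x t ih =>
    intro r
    simp only [List.foldl_cons]
    exact le_trans (le_max_left r (rkOf x)) (ih _)

lemma mem_foldM (l : List String) : ∀ r : Int,
    l.foldl (fun m s => max m (rkOf s)) r = r ∨
    ∃ s ∈ l, l.foldl (fun m s => max m (rkOf s)) r = rkOf s := by
  induction l with
  | nil => intro r; left; rfl
  | cons x t ih =>
    intro r
    simp only [List.foldl_cons]
    rcases ih (max r (rkOf x)) with h | ⟨s, hs, h⟩
    · rcases le_or_gt (rkOf x) r with hle | hlt
      · left; rw [h, max_eq_left hle]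
      · right; exact ⟨x, List.mem_cons_self, by rw [h, max_eq_right (le_of_lt hlt)]⟩
    · right; exact ⟨s, List.mem_cons_of_mem _ hs, h⟩

lemma foldM_ge (l : List String) : ∀ (r : Int) (s : String), s ∈ l →
    rkOf s ≤ l.foldl (fun m s => max m (rkOf s)) r := by
  induction l with
  | nil => intro r s h; cases h
  | cons x t ih =>
    intro r s h
    simp only [List.foldl_cons]
    rcases List.mem_cons.mp h with rfl | h
    · exact le_trans (le_max_right r (rkOf s)) (le_foldM t _)
    · exact ih _ s h

lemma A_eq (l : List String) :
    strongest_severity_py l = nameOf (l.foldl (fun m s => max m (rkOf s)) (-1)) := by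
  unfold strongest_severity_py
  have h0 : ((none : Option String), (-1 : Int)) = (nameOf (-1), (-1 : Int)) := rfl
  rw [h0, foldA l (-1)]

lemma rk_F (s : String) : rkOf s = 2 ↔ pySeverity s = "FATAL" := by
  rcases sev_cases s with h | h | h <;> simp [rkOf, h] <;> decide

lemma rk_R (s : String) : rkOf s = 1 ↔ pySeverity s = "REPAIRABLE" := by
  rcases sev_cases s with h | h | h <;> simp [rkOf, h] <;> decide

lemma rk_A (s : String) : rkOf s = 0 ↔ pySeverity s = "ADVISORY" := by
  rcases sev_cases s with h | h | h <;> simp [rkOf, h] <;> decide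

lemma B_eq (l : List String) :
    strongest_severity_py_alt l = nameOf (l.foldl (fun m s => max m (rkOf s)) (-1)) := by
  unfold strongest_severity_py_alt
  have hcon : ∀ lv : String,
      PySem.Set.contains (PySem.Set.ofList (l.map pySeverity)) lv = true ↔
        ∃ s ∈ l, pySeverity s = lv := by
    intro lv
    rw [PySem.Set.contains_iff, PySem.Set.mem_ofList, List.mem_map]
  rcases mem_foldM l (-1) with hm | ⟨s0, hs0, hm⟩
  · have hno : ∀ lv : String,
        ¬ PySem.Set.contains (PySem.Set.ofList (l.map pySeverity)) lv = true := by
      intro lv hc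
      rcases (hcon lv).mp hc with ⟨s, hs, _⟩
      have hge := foldM_ge l (-1) s hs
      rw [hm] at hge
      rcases rk_cases s with h | h | h <;> omega
    rw [hm]
    simp only [List.find?]
    rw [Bool.eq_false_iff.mpr (hno "FATAL"), Bool.eq_false_iff.mpr (hno "REPAIRABLE"),
        Bool.eq_false_iff.mpr (hno "ADVISORY")]
    rfl
  · have hle : ∀ s ∈ l, rkOf s ≤ rkOf s0 := by
      intro s hs; have := foldM_ge l (-1) s hs; omega
    rcases rk_cases s0 with h0 | h0 | h0
    · -- M = 0: only ADVISORY present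
      have hFf : ¬ PySem.Set.contains (PySem.Set.ofList (l.map pySeverity)) "FATAL" = true := by
        intro hc
        rcases (hcon "FATAL").mp hc with ⟨s, hs, h⟩
        have := (rk_F s).mpr h; have := hle s hs; omega
      have hRf : ¬ PySem.Set.contains (PySem.Set.ofList (l.map pySeverity)) "REPAIRABLE" = true := by
        intro hc
        rcases (hcon "REPAIRABLE").mp hc with ⟨s, hs, h⟩
        have := (rk_R s).mpr h; have := hle s hs; omega
      have hAt : PySem.Set.contains (PySem.Set.ofList (l.map pySeverity)) "ADVISORY" = true :=
        (hcon "ADVISORY").mpr ⟨s0, hs0, (rk_A s0).mp h0⟩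
      rw [hm, h0]
      simp only [List.find?]
      rw [Bool.eq_false_iff.mpr hFf, Bool.eq_false_iff.mpr hRf, hAt]
      rfl
    · -- M = 1: REPAIRABLE present, FATAL absent
      have hFf : ¬ PySem.Set.contains (PySem.Set.ofList (l.map pySeverity)) "FATAL" = true := by
        intro hc
        rcases (hcon "FATAL").mp hc with ⟨s, hs, h⟩
        have := (rk_F s).mpr h; have := hle s hs; omega
      have hRt : PySem.Set.contains (PySem.Set.ofList (l.map pySeverity)) "REPAIRABLE" = true :=
        (hcon "REPAIRABLE").mpr ⟨s0, hs0, (rk_R s0).mp h0⟩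
      rw [hm, h0]
      simp only [List.find?]
      rw [Bool.eq_false_iff.mpr hFf, hRt]
      rfl
    · -- M = 2: FATAL present
      have hFt : PySem.Set.contains (PySem.Set.ofList (l.map pySeverity)) "FATAL" = true :=
        (hcon "FATAL").mpr ⟨s0, hs0, (rk_F s0).mp h0⟩
      rw [hm, h0]
      simp only [List.find?]
      rw [hFt]
      rfl

-- ===== VERDICT (by name: the statement is the Claim_ definition above) =====
theorem strongest_severity_py_spec : Claim_equal_strongest_severity_py := by
  intro l _
  unfold Spec_strongest_severity_py
  rw [A_eq, B_eq]
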